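-- pv_equiv track=rewrite | github.com/arman1337/ICT | Task 4/136.py | make_d
-- ===== SOURCE A (Python) =====
-- alph = "abcdefghijklmnopqrstuvwxyz"
--
-- def make_d(s):
--     d = {}
--     for char in s:
--         if char in alph:
--             if char in d.keys():
--                 d[char] += 1
--                 continue
--             d[char] = 1
--     return d
-- ===== SOURCE B (Python) =====
-- alph = "abcdefghijklmnopqrstuvwxyz"
--
-- def make_d(s):
--     # dedupe s in first-appearance order, then count each letter with one s.count scan
--     return {c: s.count(c) for c in dict.fromkeys(s) if c in alph}
-- ===== Notes on version B (the rewrite author's own statement) =====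
-- stated objective: faster
-- what changed: Replaces the single Python-level pass with per-character dict updates by an ordered dedupe (dict.fromkeys) followed by one s.count(c) scan per distinct lowercase letter, built in one comprehension.
import Mathlib
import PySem

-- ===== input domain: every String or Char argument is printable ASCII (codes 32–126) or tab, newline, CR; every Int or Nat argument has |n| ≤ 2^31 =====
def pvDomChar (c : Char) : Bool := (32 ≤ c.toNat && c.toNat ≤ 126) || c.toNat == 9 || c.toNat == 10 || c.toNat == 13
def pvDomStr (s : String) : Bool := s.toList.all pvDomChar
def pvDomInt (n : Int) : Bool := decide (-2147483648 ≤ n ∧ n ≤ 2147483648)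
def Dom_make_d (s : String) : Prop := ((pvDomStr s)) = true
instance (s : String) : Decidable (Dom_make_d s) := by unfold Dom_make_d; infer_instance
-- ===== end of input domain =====

-- B replaces A's single pass with incremental dict updates by an ordered dedupe of s followed by one s.count scan per distinct lowercase letter (alternative decomposition, same result and key order).

def pvAlph : List Char := "abcdefghijklmnopqrstuvwxyz".toList

-- ===== PORT A =====
-- 'char in alph' on a length-1 string is membership of that character among alph's characters
def make_d (s : String) : List (String × Int) :=
  (s.toList.foldl
    (fun (d : PySem.Dict Char Int) c =>
      if pvAlph.contains c then
        (if d.contains c then d.modify c 0 (· + 1) else d.insert c 1)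
      else d)
    PySem.Dict.empty).items.map (fun p => (String.ofList [p.1], p.2))

-- ===== PORT B =====
-- {c: s.count(c) for c in dict.fromkeys(s) if c in alph}
def make_d_alt (s : String) : List (String × Int) :=
  ((PySem.List.dedup s.toList).foldl
    (fun (d : PySem.Dict String Int) c =>
      if pvAlph.contains c then d.insert (String.ofList [c]) (s.toList.count c : Int) else d)
    PySem.Dict.empty).items

-- ===== PRECONDITION & SPEC =====
def Spec_make_d (s : String) (out : List (String × Int)) : Prop := out = make_d_alt s
instance (s : String) (out : List (String × Int)) : Decidable (Spec_make_d s out) := by unfold Spec_make_d; infer_instance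

-- ===== CLAIM (what is proved, stated in full; the proofs are below) =====
def Claim_equal_make_d : Prop := ∀ (s : String), Dom_make_d s → Spec_make_d s (make_d s)

-- ===== LEMMAS AND PROOFS =====

-- A's guarded update (increment if present, else insert 1) is exactly Counter's modify step
lemma make_d_step (d : PySem.Dict Char Int) (c : Char) :
    (if d.contains c then d.modify c 0 (· + 1) else d.insert c 1) = d.modify c 0 (· + 1) := by
  by_cases h : d.contains c = true
  · simp [h]
  · simp only [h, Bool.false_eq_true, if_false]
    unfold PySem.Dict.modify
    simp [PySem.Dict.getD_of_not_contains (d := d) (k := c) (d0 := 0) (by simpa using h)]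

lemma add_filter (p : Char → Bool) (acc : List Char) (x : Char) (hp : p x = true) :
    PySem.Set.add (acc.filter p) x = (PySem.Set.add acc x).filter p := by
  unfold PySem.Set.add PySem.Set.contains
  by_cases hm : x ∈ acc
  · simp [hm, hp]
  · simp [hm, hp, List.filter_append]

lemma add_filter_neg (p : Char → Bool) (acc : List Char) (x : Char) (hp : p x = false) :
    (PySem.Set.add acc x).filter p = acc.filter p := by
  unfold PySem.Set.add PySem.Set.contains
  by_cases hm : x ∈ acc
  · simp [hm]
  · simp [hm, hp, List.filter_append]

-- ordered dedup (Set.ofList) commutes with filter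
lemma ofList_filter (p : Char → Bool) (l : List Char) :
    PySem.Set.ofList (l.filter p) = (PySem.Set.ofList l).filter p := by
  rw [PySem.Set.ofList_eq_foldl, PySem.Set.ofList_eq_foldl]
  suffices h : ∀ (l : List Char) (acc : List Char),
      (l.filter p).foldl PySem.Set.add (acc.filter p) = (l.foldl PySem.Set.add acc).filter p by
    simpa using h l []
  intro l
  induction l with
  | nil => intro acc; rfl
  | cons x t ih =>
    intro acc
    by_cases hp : p x = true
    · simp only [List.filter_cons, hp, if_pos, List.foldl_cons]
      rw [add_filter p acc x hp]
      exact ih (PySem.Set.add acc x)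
    · simp only [List.filter_cons, hp, List.foldl_cons, Bool.false_eq_true, if_false]
      rw [← add_filter_neg p acc x (by simpa using hp)]
      exact ih (PySem.Set.add acc x)

theorem make_d_eq_alt (s : String) : make_d s = make_d_alt s := by
  unfold make_d make_d_alt
  have ha : (s.toList.foldl
      (fun (d : PySem.Dict Char Int) c =>
        if pvAlph.contains c then
          (if d.contains c then d.modify c 0 (· + 1) else d.insert c 1)
        else d) PySem.Dict.empty) = PySem.Dict.counter (s.toList.filter (fun c => pvAlph.contains c)) := by
    have h1 := PySem.List.foldl_congr_mem (l := s.toList) (init := (PySem.Dict.empty : PySem.Dict Char Int))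
      (f := fun (d : PySem.Dict Char Int) c =>
        if pvAlph.contains c then
          (if d.contains c then d.modify c 0 (· + 1) else d.insert c 1)
        else d)
      (g := fun (d : PySem.Dict Char Int) c =>
        if pvAlph.contains c then d.modify c 0 (· + 1) else d)
      (by intro acc x _; by_cases h : pvAlph.contains x = true <;> simp [h, make_d_step])
    rw [h1]
    rw [PySem.List.foldl_if_eq_foldl_filter]
    rw [PySem.Dict.counter_eq_foldl]
  rw [ha, PySem.Dict.items_counter]
  -- B side
  rw [PySem.List.foldl_if_eq_foldl_filter]
  rw [PySem.List.dedup_eq_ofList, ← ofList_filter]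
  simp only [PySem.Dict.items_foldl_insert_fresh
      (l := PySem.Set.ofList (List.filter pvAlph.contains s.toList))
      (d := PySem.Dict.empty)
      (k := fun c => String.ofList [c]) (v := fun c => (s.toList.count c : Int))
      (fun a _ => by simp [PySem.Dict.contains_empty])
      (by
        refine List.Nodup.map ?_ (PySem.Set.nodup_ofList _)
        intro a b h
        have := congrArg String.toList h
        simpa using this)]
  show _ = [] ++ _
  rw [List.nil_append, List.map_map]
  apply List.map_congr_left
  intro c hc
  have hc' : c ∈ List.filter (fun c => pvAlph.contains c) s.toList := by
    simpa [pysem] using hc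
  have hp : pvAlph.contains c = true := (List.mem_filter.mp hc').2
  have hmem : c ∈ pvAlph := by simpa using hp
  simp only [Function.comp]
  rw [List.count_filter (by simpa using hmem)]

-- ===== VERDICT (by name: the statement is the Claim_ definition above) =====
theorem make_d_spec : Claim_equal_make_d := by
  intro s _
  exact make_d_eq_alt s
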